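-- pv_equiv track=rewrite | github.com/c-mita/AoC | 2022/23.py | step_elves
-- ===== SOURCE A (Python) =====
-- import collections
--
-- def step_elves(elves, instructions):
--     proposals = collections.defaultdict(list)
--     new_elves = set()
--     for elf in elves:
--         ex, ey = elf
--         neighbours = [
--                 (ex-1, ey-1), (ex-1, ey), (ex-1, ey+1),
--                 (ex, ey-1), (ex, ey+1),
--                 (ex+1, ey-1), (ex+1, ey), (ex+1, ey+1),
--         ]
--         if not any(n in elves for n in neighbours):
--             new_elves.add(elf)
--             continue
--         north = [(ex-1, ey-1), (ex-1, ey), (ex-1, ey+1)]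
--         south = [(ex+1, ey-1), (ex+1, ey), (ex+1, ey+1)]
--         west = [(ex-1, ey-1), (ex, ey-1), (ex+1, ey-1)]
--         east = [(ex-1, ey+1), (ex, ey+1), (ex+1, ey+1)]
--         for instruction in instructions:
--             if instruction == "N" and not any(n in elves for n in north):
--                 proposals[(ex-1, ey)].append(elf)
--                 break
--             elif instruction == "S" and not any(n in elves for n in south):
--                 proposals[(ex+1, ey)].append(elf)
--                 break
--             elif instruction == "W" and not any(n in elves for n in west):
--                 proposals[(ex, ey-1)].append(elf)
--                 break
--             elif instruction == "E" and not any(n in elves for n in east):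
--                 proposals[(ex, ey+1)].append(elf)
--                 break
--         else:
--             new_elves.add(elf)
--
--     moved = False
--     for pos, elves in proposals.items():
--         if len(elves) == 1:
--             new_elves.add(pos)
--             moved = True
--         else:
--             for elf in elves:
--                 new_elves.add(elf)
--     return new_elves, moved
-- ===== SOURCE B (Python) =====
-- import collections
--
-- _OFFSETS = [(-1, -1), (-1, 0), (-1, 1), (0, -1), (0, 1), (1, -1), (1, 0), (1, 1)]
-- _DIRS = {
--     "N": (((-1, -1), (-1, 0), (-1, 1)), (-1, 0)),
--     "S": (((1, -1), (1, 0), (1, 1)), (1, 0)),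
--     "W": (((-1, -1), (0, -1), (1, -1)), (0, -1)),
--     "E": (((-1, 1), (0, 1), (1, 1)), (0, 1)),
-- }
--
-- def _propose(elves, instructions, elf):
--     ex, ey = elf
--     if all((ex + dx, ey + dy) not in elves for dx, dy in _OFFSETS):
--         return None
--     for ins in instructions:
--         entry = _DIRS.get(ins)
--         if entry is not None:
--             checks, (mx, my) = entry
--             if all((ex + dx, ey + dy) not in elves for dx, dy in checks):
--                 return (ex + mx, ey + my)
--     return None
--
-- def step_elves(elves, instructions):
--     props = [(elf, _propose(elves, instructions, elf)) for elf in elves]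
--     dests = [d for _, d in props if d is not None]
--     counts = collections.Counter(dests)
--     new_elves = {elf for elf, d in props if d is None}
--     moved = False
--     for d in dict.fromkeys(dests):
--         if counts[d] == 1:
--             new_elves.add(d)
--             moved = True
--         else:
--             new_elves.update(e for e, p in props if p == d)
--     return new_elves, moved
-- ===== Notes on version B (the rewrite author's own statement) =====
-- stated objective: alternative
-- what changed: B replaces A's inline elif chain and defaultdict position->elf-list buckets by a table-driven per-elf proposal function, a flat (elf, proposal) list with a Counter of destinations, and a resolution pass over the destinations in first-proposal order.
import Mathlib
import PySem

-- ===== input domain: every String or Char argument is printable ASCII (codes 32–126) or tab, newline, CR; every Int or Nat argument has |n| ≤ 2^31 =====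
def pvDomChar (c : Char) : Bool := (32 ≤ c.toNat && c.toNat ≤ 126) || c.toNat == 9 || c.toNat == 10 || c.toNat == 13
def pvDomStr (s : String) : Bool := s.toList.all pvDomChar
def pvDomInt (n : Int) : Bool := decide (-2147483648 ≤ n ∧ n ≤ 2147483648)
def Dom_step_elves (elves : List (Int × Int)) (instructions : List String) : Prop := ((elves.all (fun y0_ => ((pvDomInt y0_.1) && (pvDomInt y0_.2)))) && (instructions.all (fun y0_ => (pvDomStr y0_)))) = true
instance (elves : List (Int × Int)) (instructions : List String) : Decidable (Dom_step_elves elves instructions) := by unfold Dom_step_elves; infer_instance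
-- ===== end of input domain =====

-- B restructures one elf-diffusion step: a per-elf proposal function driven by a direction table, a flat
-- (elf, proposal) list with a Counter of destinations and an ordered-dedup resolution pass, instead of A's
-- inline branches and defaultdict position→elf-list buckets; objective: alternative (same asymptotic cost).

-- ===== PORT A =====
-- the for-instruction loop of A (break returns the proposed destination, else-clause = none)
def pvLoopA (elves : List (Int × Int)) (ex ey : Int) : List String → Option (Int × Int)
  | [] => none
  | instruction :: rest =>
    if instruction == "N" && !([(ex-1, ey-1), (ex-1, ey), (ex-1, ey+1)].any fun n => elves.contains n) then
      some (ex-1, ey)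
    else if instruction == "S" && !([(ex+1, ey-1), (ex+1, ey), (ex+1, ey+1)].any fun n => elves.contains n) then
      some (ex+1, ey)
    else if instruction == "W" && !([(ex-1, ey-1), (ex, ey-1), (ex+1, ey-1)].any fun n => elves.contains n) then
      some (ex, ey-1)
    else if instruction == "E" && !([(ex-1, ey+1), (ex, ey+1), (ex+1, ey+1)].any fun n => elves.contains n) then
      some (ex, ey+1)
    else pvLoopA elves ex ey rest

-- body of A's first loop: proposals defaultdict + new_elves set
def pvStepA (elves : List (Int × Int)) (instructions : List String)
    (st : PySem.Dict (Int × Int) (List (Int × Int)) × PySem.Set (Int × Int)) (elf : Int × Int) :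
    PySem.Dict (Int × Int) (List (Int × Int)) × PySem.Set (Int × Int) :=
  let ex := elf.1
  let ey := elf.2
  let neighbours := [(ex-1, ey-1), (ex-1, ey), (ex-1, ey+1), (ex, ey-1), (ex, ey+1),
                     (ex+1, ey-1), (ex+1, ey), (ex+1, ey+1)]
  if !(neighbours.any fun n => elves.contains n) then (st.1, PySem.Set.add st.2 elf)
  else
    match pvLoopA elves ex ey instructions with
    | some pos => (st.1.insert pos (st.1.getD pos [] ++ [elf]), st.2)
    | none => (st.1, PySem.Set.add st.2 elf)

-- body of A's second loop over proposals.items()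
def pvResolveA (acc : PySem.Set (Int × Int) × Bool) (g : (Int × Int) × List (Int × Int)) :
    PySem.Set (Int × Int) × Bool :=
  if g.2.length == 1 then (PySem.Set.add acc.1 g.1, true)
  else (g.2.foldl PySem.Set.add acc.1, acc.2)

def step_elves (elves : List (Int × Int)) (instructions : List String) : (List (Int × Int)) × Bool :=
  let st := elves.foldl (pvStepA elves instructions) (PySem.Dict.empty, PySem.Set.empty)
  st.1.items.foldl pvResolveA (st.2, false)

-- ===== PORT B =====
def pvOffsets : List (Int × Int) := [(-1,-1), (-1,0), (-1,1), (0,-1), (0,1), (1,-1), (1,0), (1,1)]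

def pvDirs : PySem.Dict String (List (Int × Int) × (Int × Int)) :=
  ⟨[("N", ([(-1,-1), (-1,0), (-1,1)], (-1,0))),
    ("S", ([(1,-1), (1,0), (1,1)], (1,0))),
    ("W", ([(-1,-1), (0,-1), (1,-1)], (0,-1))),
    ("E", ([(-1,1), (0,1), (1,1)], (0,1)))]⟩

-- the for-ins loop of B's _propose
def pvFirstDir (elves : List (Int × Int)) (ex ey : Int) : List String → Option (Int × Int)
  | [] => none
  | ins :: rest =>
    match pvDirs.get? ins with
    | some entry =>
      if entry.1.all fun d => !(elves.contains (ex + d.1, ey + d.2)) then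
        some (ex + entry.2.1, ey + entry.2.2)
      else pvFirstDir elves ex ey rest
    | none => pvFirstDir elves ex ey rest

def pvPropose (elves : List (Int × Int)) (instructions : List String) (elf : Int × Int) :
    Option (Int × Int) :=
  if pvOffsets.all fun d => !(elves.contains (elf.1 + d.1, elf.2 + d.2)) then none
  else pvFirstDir elves elf.1 elf.2 instructions

-- body of B's resolution loop over the deduped destinations
def pvStepB (props : List ((Int × Int) × Option (Int × Int))) (counts : PySem.Dict (Int × Int) Int)
    (acc : PySem.Set (Int × Int) × Bool) (d : Int × Int) : PySem.Set (Int × Int) × Bool :=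
  if counts.getD d 0 == 1 then (PySem.Set.add acc.1 d, true)
  else ((props.filterMap fun p => if p.2 == some d then some p.1 else none).foldl PySem.Set.add acc.1, acc.2)

def step_elves_alt (elves : List (Int × Int)) (instructions : List String) : (List (Int × Int)) × Bool :=
  let props := elves.map fun elf => (elf, pvPropose elves instructions elf)
  let dests := props.filterMap fun p => p.2
  let counts := PySem.Dict.counter dests
  let newElves := PySem.Set.ofList (props.filterMap fun p => if p.2.isNone then some p.1 else none)
  (PySem.List.dedup dests).foldl (pvStepB props counts) (newElves, false)

-- ===== PRECONDITION & SPEC =====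
def Spec_step_elves (elves : List (Int × Int)) (instructions : List String) (out : (List (Int × Int)) × Bool) : Prop := out = step_elves_alt elves instructions
instance (elves : List (Int × Int)) (instructions : List String) (out : (List (Int × Int)) × Bool) : Decidable (Spec_step_elves elves instructions out) := by unfold Spec_step_elves; infer_instance

-- ===== CLAIM (what is proved, stated in full; the proofs are below) =====
def Claim_equal_step_elves : Prop := ∀ (elves : List (Int × Int)) (instructions : List String), Dom_step_elves elves instructions → Spec_step_elves elves instructions (step_elves elves instructions)

-- ===== LEMMAS AND PROOFS =====

-- B's per-elf instruction scan computes exactly A's inline elif chain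
theorem pvFirstDir_eq_pvLoopA (elves : List (Int × Int)) (ex ey : Int) (l : List String) :
    pvFirstDir elves ex ey l = pvLoopA elves ex ey l := by
  induction l with
  | nil => rfl
  | cons ins rest ih =>
    by_cases h1 : ins = "N"
    · subst h1
      simp [pvFirstDir, pvLoopA, pvDirs, PySem.Dict.get?, ih, sub_eq_add_neg, Bool.not_or]
    · by_cases h2 : ins = "S"
      · subst h2
        simp [pvFirstDir, pvLoopA, pvDirs, PySem.Dict.get?, ih, sub_eq_add_neg, Bool.not_or]
      · by_cases h3 : ins = "W"
        · subst h3
          simp [pvFirstDir, pvLoopA, pvDirs, PySem.Dict.get?, ih, sub_eq_add_neg, Bool.not_or]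
        · by_cases h4 : ins = "E"
          · subst h4
            simp [pvFirstDir, pvLoopA, pvDirs, PySem.Dict.get?, ih, sub_eq_add_neg, Bool.not_or]
          · simp [pvFirstDir, pvLoopA, pvDirs, PySem.Dict.get?, ih, Ne.symm h1, Ne.symm h2, Ne.symm h3, Ne.symm h4, pvLoopA, h1, h2, h3, h4]

-- A's first-loop body, written through B's proposal function
theorem pvStepA_eq (elves : List (Int × Int)) (instructions : List String)
    (st : PySem.Dict (Int × Int) (List (Int × Int)) × PySem.Set (Int × Int)) (elf : Int × Int) :
    pvStepA elves instructions st elf =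
      match pvPropose elves instructions elf with
      | some pos => (st.1.insert pos (st.1.getD pos [] ++ [elf]), st.2)
      | none => (st.1, PySem.Set.add st.2 elf) := by
  have hc : (pvOffsets.all fun d => !(elves.contains (elf.1 + d.1, elf.2 + d.2)))
      = !([(elf.1-1, elf.2-1), (elf.1-1, elf.2), (elf.1-1, elf.2+1), (elf.1, elf.2-1), (elf.1, elf.2+1),
           (elf.1+1, elf.2-1), (elf.1+1, elf.2), (elf.1+1, elf.2+1)].any fun n => elves.contains n) := by
    simp [pvOffsets, Bool.not_or, sub_eq_add_neg]
  rw [pvStepA, pvPropose, hc, pvFirstDir_eq_pvLoopA]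
  split_ifs with h
  · rfl
  · rfl

-- characterisation of A's first loop
theorem phase1_eq (E : List (Int × Int)) (I : List String) (l : List (Int × Int))
    (d : PySem.Dict (Int × Int) (List (Int × Int))) (s : PySem.Set (Int × Int)) :
    l.foldl (pvStepA E I) (d, s) =
      ((l.filterMap fun e => (pvPropose E I e).map fun dst => (dst, e)).foldl
          (fun d p => d.insert p.1 (d.getD p.1 [] ++ [p.2])) d,
       (l.filterMap fun e => if (pvPropose E I e).isNone then some e else none).foldl
          PySem.Set.add s) := by
  induction l generalizing d s with
  | nil => rfl
  | cons e l ih =>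
    rw [List.foldl_cons, pvStepA_eq]
    cases h : pvPropose E I e with
    | none => simp [h, ih]
    | some dst => simp [h, ih]

-- getD on a dict whose items are K.map (k, c k)
theorem getD_mapped (K : List (Int × Int)) (c : Int × Int → List (Int × Int)) (k0 : Int × Int) :
    (PySem.Dict.mk (K.map fun k => (k, c k)) : PySem.Dict (Int × Int) (List (Int × Int))).getD k0 []
      = if k0 ∈ K then c k0 else [] := by
  induction K with
  | nil => simp [PySem.Dict.getD, PySem.Dict.get?]
  | cons k K ih =>
    by_cases h : k = k0
    · subst h; simp [PySem.Dict.getD, PySem.Dict.get?]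
    · have hb : (k == k0) = false := by simp [h]
      simp only [PySem.Dict.getD, PySem.Dict.get?, List.map_cons, List.find?_cons, hb] at *
      simpa [Ne.symm h] using ih

theorem dedup_append_singleton (xs : List (Int × Int)) (x : Int × Int) :
    PySem.List.dedup (xs ++ [x]) = PySem.Set.add (PySem.List.dedup xs) x := by
  simp [PySem.List.dedup_eq_ofList, PySem.Set.ofList_eq_foldl, List.foldl_append]

theorem contains_mapped (K : List (Int × Int)) (c : Int × Int → List (Int × Int)) (k0 : Int × Int) :
    (PySem.Dict.mk (K.map fun k => (k, c k)) : PySem.Dict (Int × Int) (List (Int × Int))).contains k0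
      = decide (k0 ∈ K) := by
  induction K with
  | nil => simp [PySem.Dict.contains]
  | cons k K ih =>
    simp only [PySem.Dict.contains, List.map_cons, List.any_cons] at *
    by_cases h : k = k0
    · subst h; simp
    · simp [h, Ne.symm h, ih]

theorem group_items (ps : List ((Int × Int) × (Int × Int))) :
    ((ps.foldl (fun d p => d.insert p.1 (d.getD p.1 [] ++ [p.2]))
        (PySem.Dict.empty : PySem.Dict (Int × Int) (List (Int × Int))))).items =
      (PySem.List.dedup (ps.map Prod.fst)).map
        fun k => (k, ps.filterMap fun p => if p.1 == k then some p.2 else none) := by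
  induction ps using List.reverseRecOn with
  | nil => simp [PySem.Dict.empty, PySem.List.dedup, PySem.Set.ofList]
  | append_singleton ps p ih =>
    rw [List.foldl_append, List.foldl_cons, List.foldl_nil]
    -- the accumulated dict is the mapped dict over K := dedup (ps.map fst)
    have hK : (ps.foldl (fun d p => d.insert p.1 (d.getD p.1 [] ++ [p.2]))
        (PySem.Dict.empty : PySem.Dict (Int × Int) (List (Int × Int)))) =
        PySem.Dict.mk ((PySem.List.dedup (ps.map Prod.fst)).map
          fun k => (k, ps.filterMap fun p => if p.1 == k then some p.2 else none)) := by
      cases hD : (ps.foldl (fun d p => d.insert p.1 (d.getD p.1 [] ++ [p.2]))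
        (PySem.Dict.empty : PySem.Dict (Int × Int) (List (Int × Int)))) with
      | mk items => rw [← ih, hD]
    rw [hK]
    set K := PySem.List.dedup (ps.map Prod.fst) with hKdef
    set c : Int × Int → List (Int × Int) := fun k => ps.filterMap fun p => if p.1 == k then some p.2 else none with hcdef
    have hmemK : ∀ k, k ∈ K ↔ k ∈ ps.map Prod.fst := by
      intro k; rw [hKdef, PySem.List.dedup_eq_ofList]; exact PySem.Set.mem_ofList _ _
    have hdedup : PySem.List.dedup ((ps ++ [p]).map Prod.fst)
        = if p.1 ∈ K then K else K ++ [p.1] := by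
      rw [List.map_append]
      simp only [List.map_cons, List.map_nil]
      rw [dedup_append_singleton, ← hKdef, PySem.Set.add]
      by_cases hm : p.1 ∈ K
      · simp [hm]
      · simp [hm]
    have hc' : ∀ k, ((ps ++ [p]).filterMap fun q => if q.1 == k then some q.2 else none)
        = c k ++ (if p.1 = k then [p.2] else []) := by
      intro k
      rw [List.filterMap_append, hcdef]
      simp only [List.filterMap_cons, List.filterMap_nil]
      by_cases h : p.1 = k
      · simp [h]
      · simp [h]
    rw [PySem.Dict.insert, contains_mapped, getD_mapped, hdedup]
    by_cases hm : p.1 ∈ K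
    · simp only [hm, decide_true, if_true]
      rw [List.map_map]
      apply List.map_congr_left
      intro k hk
      by_cases h : k = p.1
      · subst h
        simp only [Function.comp_apply, beq_self_eq_true, if_true]
        rw [hc' p.1]
        simp [hcdef]
      · have hb : (k == p.1) = false := by simp [h]
        simp only [Function.comp_apply, hb, Bool.false_eq_true, if_false]
        rw [hc' k]
        simp [Ne.symm h, hcdef]
    · have hck : c p.1 = [] := by
        rw [hcdef, List.filterMap_eq_nil_iff]
        intro q hq
        have hne : (q.1 == p.1) = false := by
          refine beq_eq_false_iff_ne.2 ?_
          intro hh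
          exact hm ((hmemK p.1).2 (hh ▸ List.mem_map_of_mem hq))
        simp [hne]
      simp only [hm, decide_false, Bool.false_eq_true, if_false, List.map_append, List.map_cons,
        List.map_nil]
      congr 1
      · apply List.map_congr_left
        intro k hk
        have hne : ¬ p.1 = k := fun hh => hm (hh ▸ hk)
        rw [hc' k]
        simp [hne, hcdef]
      · rw [hc' p.1, hck]
        simp

-- length of the selected sublist = multiplicity of the destination
theorem len_sel (l : List (Int × Int)) (f : Int × Int → Option (Int × Int)) (k : Int × Int) :
    (l.filterMap fun e => if f e == some k then some e else none).length
      = (l.filterMap f).count k := by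
  induction l with
  | nil => simp
  | cons e l ih =>
    cases h : f e with
    | none => simpa [h] using ih
    | some d =>
      by_cases hd : d = k
      · subst hd; simpa [h] using ih
      · simpa [h, hd] using ih

-- ===== VERDICT (by name: the statement is the Claim_ definition above) =====
theorem step_elves_spec : Claim_equal_step_elves := by
  intro elves instructions _
  show step_elves elves instructions = step_elves_alt elves instructions
  rw [step_elves, step_elves_alt]
  rw [phase1_eq]
  rw [group_items]
  have hsel : ∀ k : Int × Int,
      (List.filterMap (fun p => if (p.1 == k) = true then some p.2 else none)
        (List.filterMap (fun e => Option.map (fun dst => (dst, e)) (pvPropose elves instructions e)) elves))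
      = List.filterMap (fun e => if pvPropose elves instructions e == some k then some e else none) elves := by
    intro k
    rw [List.filterMap_filterMap]
    apply List.filterMap_congr
    intro e _
    cases h : pvPropose elves instructions e with
    | none => simp
    | some d =>
      by_cases hd : d = k
      · subst hd; simp
      · simp [hd]
  have hfst : List.map Prod.fst (List.filterMap
        (fun e => Option.map (fun dst => (dst, e)) (pvPropose elves instructions e)) elves)
      = List.filterMap (fun e => pvPropose elves instructions e) elves := by
    rw [List.map_filterMap]
    apply List.filterMap_congr
    intro e _
    cases h : pvPropose elves instructions e <;> simp
  simp only [List.filterMap_map, Function.comp_def]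
  rw [List.foldl_map, hfst]
  congr 1
  · funext acc k
    rw [pvResolveA, pvStepB, hsel k, PySem.Dict.getD_counter, ← len_sel]
    simp only [List.filterMap_map, Function.comp_def]
    simp [Nat.cast_eq_one]
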